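-- pv_equiv track=rewrite | github.com/vinivin153/problem-solving | Programmers/84021.py | outputPosition
-- ===== SOURCE A (Python) =====
-- dx = [0, 0, 1, -1]
--
-- dy = [1, -1, 0, 0]
--
-- def outputPosition(mat, visit, size, x, y, flag):
--     position = set()
--     position.add((0, 0))
--     a, b = -x, -y
--     stack = []
--     stack.append((x, y))
--     visit[x][y] = 1
--     while stack:
--         x, y = stack.pop()
--         for i in range(4):
--             nx = dx[i] + x
--             ny = dy[i] + y
--             if 0 <= nx < size and 0 <= ny < size:
--                 if visit[nx][ny] == 0 and (mat[nx][ny] ^ flag):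
--                     stack.append((nx, ny))
--                     visit[nx][ny] = 1
--                     position.add((nx + a, ny + b))
--     return position
-- ===== SOURCE B (Python) =====
-- def outputPosition(mat, visit, size, x, y, flag):
--     a, b = -x, -y
--     visit[x][y] = 1
--     position = {(0, 0)}
--
--     def try_cell(nx, ny, pending):
--         if 0 <= nx < size and 0 <= ny < size and visit[nx][ny] == 0 and (mat[nx][ny] ^ flag):
--             visit[nx][ny] = 1
--             position.add((nx + a, ny + b))
--             pending.append((nx, ny))
--
--     def dfs(cx, cy):
--         pending = []
--         try_cell(cx, cy + 1, pending)
--         try_cell(cx, cy - 1, pending)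
--         try_cell(cx + 1, cy, pending)
--         try_cell(cx - 1, cy, pending)
--         while pending:
--             dfs(*pending.pop())
--
--     dfs(x, y)
--     return position
-- ===== Notes on version B (the rewrite author's own statement) =====
-- stated objective: alternative
-- what changed: The dx/dy-table explicit-stack while-loop is replaced by a recursive DFS with the four neighbour probes written out inline through a try_cell helper that marks, records and defers each eligible neighbour, recursing only after the whole neighbourhood scan.
-- outside the precondition, e.g. on outputPosition([[1, 0], [0, 9]], [[0, 0], [0]], 2, 0, 0, 0): A returns {(0, 0)}, B returns {(0, 0)}
import Mathlib
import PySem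

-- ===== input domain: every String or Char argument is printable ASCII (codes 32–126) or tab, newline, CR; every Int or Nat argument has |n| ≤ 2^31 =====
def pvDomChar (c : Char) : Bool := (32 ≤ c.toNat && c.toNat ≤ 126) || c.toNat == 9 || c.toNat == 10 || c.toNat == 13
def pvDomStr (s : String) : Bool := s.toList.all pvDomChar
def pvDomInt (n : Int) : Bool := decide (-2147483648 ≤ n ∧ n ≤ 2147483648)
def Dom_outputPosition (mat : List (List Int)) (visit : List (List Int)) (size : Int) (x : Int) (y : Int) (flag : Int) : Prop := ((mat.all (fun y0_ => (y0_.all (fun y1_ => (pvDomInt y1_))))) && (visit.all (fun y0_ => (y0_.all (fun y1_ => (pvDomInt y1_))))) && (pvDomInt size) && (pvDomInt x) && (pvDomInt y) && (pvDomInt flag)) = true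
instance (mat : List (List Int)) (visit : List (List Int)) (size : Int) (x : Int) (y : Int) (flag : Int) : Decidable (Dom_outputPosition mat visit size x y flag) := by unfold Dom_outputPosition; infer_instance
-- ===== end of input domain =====

-- B replaces A's dx/dy-table explicit-stack loop by a recursive DFS whose four neighbour probes are
-- written out inline (no direction table, no range(4) loop); both A and B mutate the 'visit' argument
-- in place in the identical way, and the theorems below are about the return value.

-- ===== PORT A =====
def pvDx : List Int := [0, 0, 1, -1]
def pvDy : List Int := [1, -1, 0, 0]

-- body of A's 'for i in range(4)' loop; state = (visit, stack, position)
def pvBodyA (mat : List (List Int)) (size flag a b : Int)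
    (st : List (List Int) × List (Int × Int) × List (Int × Int)) (xy : Int × Int) (i : Int) :
    List (List Int) × List (Int × Int) × List (Int × Int) :=
  let nx := PySem.List.pyGetD pvDx i 0 + xy.1
  let ny := PySem.List.pyGetD pvDy i 0 + xy.2
  if 0 ≤ nx ∧ nx < size ∧ 0 ≤ ny ∧ ny < size then
    if PySem.List.pyGetD (PySem.List.pyGetD st.1 nx []) ny 0 = 0 ∧
       PySem.Int.bxor (PySem.List.pyGetD (PySem.List.pyGetD mat nx []) ny 0) flag ≠ 0 then
      (PySem.List.pySetD st.1 nx (PySem.List.pySetD (PySem.List.pyGetD st.1 nx []) ny 1),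
       (nx, ny) :: st.2.1,
       PySem.Set.add st.2.2 (nx + a, ny + b))
    else st
  else st

-- A's 'while stack' loop; the stack's top is the list head (stack.pop() = pop the head).
-- Fuel: every iteration pops one entry and entries are pushed only when a zero 'visit' cell inside
-- the size×size window is overwritten with 1, so on inputs satisfying Pre_ at most size²+1 pops occur.
def pvLoopA (mat : List (List Int)) (size flag a b : Int) :
    Nat → List (List Int) → List (Int × Int) → List (Int × Int) → List (Int × Int)
  | 0, _, _, p => p
  | _ + 1, _, [], p => p
  | f + 1, v, c :: rest, p =>
      let st := (PySem.List.pyRange 0 4 1).foldl (fun st i => pvBodyA mat size flag a b st c i) (v, rest, p)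
      pvLoopA mat size flag a b f st.1 st.2.1 st.2.2

def outputPosition (mat : List (List Int)) (visit : List (List Int)) (size : Int) (x : Int) (y : Int) (flag : Int) : List (Int × Int) :=
  let position := PySem.Set.add PySem.Set.empty ((0 : Int), (0 : Int))
  let a := -x
  let b := -y
  let v0 := PySem.List.pySetD visit x (PySem.List.pySetD (PySem.List.pyGetD visit x []) y 1)
  pvLoopA mat size flag a b (size.toNat * size.toNat + 1) v0 [(x, y)] position

-- ===== PORT B =====
-- B's try_cell helper: state = ((visit, position), pending); the pending stack's top (the entry
-- Python's pending.pop() removes, the most recently appended) is the list head.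
def pvTry (mat : List (List Int)) (size flag a b : Int)
    (st : (List (List Int) × List (Int × Int)) × List (Int × Int)) (nx ny : Int) :
    (List (List Int) × List (Int × Int)) × List (Int × Int) :=
  if 0 ≤ nx ∧ nx < size ∧ 0 ≤ ny ∧ ny < size ∧
     PySem.List.pyGetD (PySem.List.pyGetD st.1.1 nx []) ny 0 = 0 ∧
     PySem.Int.bxor (PySem.List.pyGetD (PySem.List.pyGetD mat nx []) ny 0) flag ≠ 0 then
    ((PySem.List.pySetD st.1.1 nx (PySem.List.pySetD (PySem.List.pyGetD st.1.1 nx []) ny 1),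
      PySem.Set.add st.1.2 (nx + a, ny + b)),
     (nx, ny) :: st.2)
  else st

-- the four inline neighbour probes of B's dfs, on a fresh empty pending list
def pvNbhd (mat : List (List Int)) (size flag a b : Int)
    (vp : List (List Int) × List (Int × Int)) (c : Int × Int) :
    (List (List Int) × List (Int × Int)) × List (Int × Int) :=
  pvTry mat size flag a b
    (pvTry mat size flag a b
      (pvTry mat size flag a b
        (pvTry mat size flag a b (vp, []) c.1 (c.2 + 1))
        c.1 (c.2 - 1))
      (c.1 + 1) c.2)
    (c.1 - 1) c.2

-- B's recursive dfs: probe the whole neighbourhood, then 'while pending: dfs(*pending.pop())'.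
-- Fuel: each nested call corresponds to a cell freshly marked in the size×size window, so on inputs
-- satisfying Pre_ the recursion depth is at most size²+1.
def pvDfs (mat : List (List Int)) (size flag a b : Int) :
    Nat → (List (List Int) × List (Int × Int)) → Int × Int → List (List Int) × List (Int × Int)
  | 0, vp, _ => vp
  | f + 1, vp, c =>
      let st := pvNbhd mat size flag a b vp c
      st.2.foldl (fun vp c' => pvDfs mat size flag a b f vp c') st.1

def outputPosition_alt (mat : List (List Int)) (visit : List (List Int)) (size : Int) (x : Int) (y : Int) (flag : Int) : List (Int × Int) :=
  let a := -x
  let b := -y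
  let v0 := PySem.List.pySetD visit x (PySem.List.pySetD (PySem.List.pyGetD visit x []) y 1)
  let position := PySem.Set.ofList [((0 : Int), (0 : Int))]
  (pvDfs mat size flag a b (size.toNat * size.toNat + 1) (v0, position) (x, y)).2

-- ===== PRECONDITION & SPEC =====
-- Pre_ admits (i) grids of at least size×size cells with any start cell the initial assignment
-- accepts (including Python's negative-index wraparound) and (ii) degenerate starts whose four
-- neighbours all fall outside the size×size window (there the loop scans nothing and A returns
-- {(0, 0)}).  The remaining inputs are excluded: on most of them A raises IndexError (a cell of the
-- fill or the start lies outside the lists' real bounds), and on the few where the ragged grid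
-- happens to stop the fill first A and B still return the same set.
def Pre_outputPosition (mat : List (List Int)) (visit : List (List Int)) (size : Int) (x : Int) (y : Int) (flag : Int) : Prop :=
  (PySem.Raise.InRange visit.length x ∧
   PySem.Raise.InRange (PySem.List.pyGetD visit x []).length y ∧
   size ≤ (visit.length : Int) ∧ (∀ r ∈ visit, size ≤ (r.length : Int)) ∧
   size ≤ (mat.length : Int) ∧ (∀ r ∈ mat, size ≤ (r.length : Int))) ∨
  (PySem.Raise.InRange visit.length x ∧
   PySem.Raise.InRange (PySem.List.pyGetD visit x []).length y ∧
   ¬ (0 ≤ x ∧ x < size ∧ 0 ≤ y + 1 ∧ y + 1 < size) ∧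
   ¬ (0 ≤ x ∧ x < size ∧ 0 ≤ y - 1 ∧ y - 1 < size) ∧
   ¬ (0 ≤ x + 1 ∧ x + 1 < size ∧ 0 ≤ y ∧ y < size) ∧
   ¬ (0 ≤ x - 1 ∧ x - 1 < size ∧ 0 ≤ y ∧ y < size))
instance (mat : List (List Int)) (visit : List (List Int)) (size : Int) (x : Int) (y : Int) (flag : Int) : Decidable (Pre_outputPosition mat visit size x y flag) := by unfold Pre_outputPosition PySem.Raise.InRange; infer_instance

def pvWitness_outputPosition : List (List Int) × List (List Int) × Int × Int × Int × Int :=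
  ([[1, 0], [0, 1]], [[0, 0], [0, 0]], 2, 0, 0, 0)

def Spec_outputPosition (mat : List (List Int)) (visit : List (List Int)) (size : Int) (x : Int) (y : Int) (flag : Int) (out : List (Int × Int)) : Prop := out = outputPosition_alt mat visit size x y flag
instance (mat : List (List Int)) (visit : List (List Int)) (size : Int) (x : Int) (y : Int) (flag : Int) (out : List (Int × Int)) : Decidable (Spec_outputPosition mat visit size x y flag out) := by unfold Spec_outputPosition; infer_instance

-- ===== CLAIM (what is proved, stated in full; the proofs are below) =====
def Claim_equal_outputPosition : Prop := ∀ (mat : List (List Int)) (visit : List (List Int)) (size : Int) (x : Int) (y : Int) (flag : Int), Dom_outputPosition mat visit size x y flag → Pre_outputPosition mat visit size x y flag → Spec_outputPosition mat visit size x y flag (outputPosition mat visit size x y flag)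

-- ===== LEMMAS AND PROOFS =====

-- the grid is at least size×size
def pvH (size : Int) (v : List (List Int)) : Prop :=
  size ≤ (v.length : Int) ∧ ∀ r ∈ v, size ≤ (r.length : Int)

-- number of zero entries in the size×size window of v (the loop/recursion measure)
def pvZ (size : Int) (v : List (List Int)) : Nat :=
  ((v.take size.toNat).map (fun r => (r.take size.toNat).countP (fun e => decide (e = 0)))).sum

-- A's loop body, abstracted over the already-computed neighbour coordinates (proof-only)
def pvStepA (mat : List (List Int)) (size flag a b : Int)
    (st : List (List Int) × List (Int × Int) × List (Int × Int)) (nx ny : Int) :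
    List (List Int) × List (Int × Int) × List (Int × Int) :=
  if 0 ≤ nx ∧ nx < size ∧ 0 ≤ ny ∧ ny < size then
    if PySem.List.pyGetD (PySem.List.pyGetD st.1 nx []) ny 0 = 0 ∧
       PySem.Int.bxor (PySem.List.pyGetD (PySem.List.pyGetD mat nx []) ny 0) flag ≠ 0 then
      (PySem.List.pySetD st.1 nx (PySem.List.pySetD (PySem.List.pyGetD st.1 nx []) ny 1),
       (nx, ny) :: st.2.1,
       PySem.Set.add st.2.2 (nx + a, ny + b))
    else st
  else st

theorem pvBodyA_eq (mat : List (List Int)) (size flag a b : Int)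
    (st : List (List Int) × List (Int × Int) × List (Int × Int)) (xy : Int × Int) (i : Int) :
    pvBodyA mat size flag a b st xy i
      = pvStepA mat size flag a b st (PySem.List.pyGetD pvDx i 0 + xy.1) (PySem.List.pyGetD pvDy i 0 + xy.2) := rfl

theorem pvSum_set (l : List Nat) (i : Nat) (m : Nat) (hi : i < l.length) (h : m + 1 ≤ l[i]) :
    (l.set i m).sum + 1 ≤ l.sum := by
  induction l generalizing i with
  | nil => simp at hi
  | cons a t ih =>
    cases i with
    | zero =>
      simp only [List.set_cons_zero, List.sum_cons]
      simp at h; omega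
    | succ j =>
      simp only [List.set_cons_succ, List.sum_cons]
      have := ih j (by simpa using hi) (by simpa using h); omega

theorem pvCountP_set (l : List Int) (j : Nat) (hj : j < l.length) (hv : l[j] = 0) :
    (l.set j 1).countP (fun e => decide (e = 0)) + 1 = l.countP (fun e => decide (e = 0)) := by
  induction l generalizing j with
  | nil => simp at hj
  | cons a t ih =>
    cases j with
    | zero => simp_all
    | succ j =>
      simp only [List.set_cons_succ, List.countP_cons]
      have := ih j (by simpa using hj) (by simpa using hv); omega

theorem pvZ_le (size : Int) (v : List (List Int)) : pvZ size v ≤ size.toNat * size.toNat := by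
  unfold pvZ
  have h1 : ∀ x ∈ (v.take size.toNat).map (fun r => (r.take size.toNat).countP (fun e => decide (e = 0))), x ≤ size.toNat := by
    intro x hx
    obtain ⟨r, _, rfl⟩ := List.mem_map.mp hx
    exact le_trans List.countP_le_length (List.length_take_le _ _)
  have h2 := List.sum_le_card_nsmul _ _ h1
  have h3 : ((v.take size.toNat).map (fun r => (r.take size.toNat).countP (fun e => decide (e = 0)))).length ≤ size.toNat := by
    simp
  calc _ ≤ _ := h2
    _ ≤ size.toNat * size.toNat := by
        have := Nat.mul_le_mul_right size.toNat h3
        simpa [smul_eq_mul] using this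

theorem pvSetD_neg (xs : List (List Int)) (i : Int) (v : List Int) (hi : i < 0) (h2 : 0 ≤ i + xs.length) :
    PySem.List.pySetD xs i v = xs.set (i + xs.length).toNat v := by
  unfold PySem.List.pySetD PySem.List.pySet? PySem.List.pyIdx?
  rw [if_neg (by omega), if_pos (by omega)]
  simp only [Option.map_some, Option.getD_some]
  congr 1
  omega

theorem pvSetD_oob (xs : List (List Int)) (i : Int) (v : List Int) (h : ¬ PySem.Raise.InRange xs.length i) :
    PySem.List.pySetD xs i v = xs := by
  unfold PySem.List.pySetD PySem.List.pySet? PySem.List.pyIdx? PySem.Raise.InRange at *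
  by_cases h0 : 0 ≤ i
  · rw [if_pos h0, if_neg (by omega)]; rfl
  · rw [if_neg h0, if_neg (by omega)]; rfl

theorem pvGetD_neg (xs : List (List Int)) (i : Int) (d : List Int) (hi : i < 0) (h2 : 0 ≤ i + xs.length) :
    PySem.List.pyGetD xs i d = xs.getD (i + xs.length).toNat d := by
  unfold PySem.List.pyGetD PySem.List.pyGet? PySem.List.pyIdx?
  rw [if_neg (by omega), if_pos (by omega)]
  have : xs.length - (-i).toNat = (i + xs.length).toNat := by omega
  simp [this, List.getD]

theorem pvH_update (size : Int) (v : List (List Int)) (nx ny : Int)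
    (h : pvH size v) (hnx0 : 0 ≤ nx) (hlen : (nx : Int) < (v.length : Int)) :
    pvH size (PySem.List.pySetD v nx (PySem.List.pySetD (PySem.List.pyGetD v nx []) ny 1)) := by
  rw [PySem.List.pySetD_of_nonneg _ _ hnx0]
  constructor
  · simpa using h.1
  · intro r hr
    rcases List.mem_or_eq_of_mem_set hr with hr | rfl
    · exact h.2 r hr
    · rw [PySem.List.length_pySetD]
      rw [PySem.List.pyGetD_eq_getElem _ _ hnx0 hlen]
      exact h.2 _ (List.getElem_mem _)

theorem pvH_update_any (size : Int) (v : List (List Int)) (x y : Int) (h : pvH size v) :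
    pvH size (PySem.List.pySetD v x (PySem.List.pySetD (PySem.List.pyGetD v x []) y 1)) := by
  by_cases hir : PySem.Raise.InRange v.length x
  · by_cases hx0 : 0 ≤ x
    · exact pvH_update size v x y h hx0 (by unfold PySem.Raise.InRange at hir; omega)
    · have hx : x < 0 := by omega
      have hb : 0 ≤ x + v.length := by unfold PySem.Raise.InRange at hir; omega
      rw [pvSetD_neg v x _ hx hb]
      have hj : (x + v.length).toNat < v.length := by unfold PySem.Raise.InRange at hir; omega
      have hrow : PySem.List.pyGetD v x ([] : List Int) = v[(x + v.length).toNat] := by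
        rw [pvGetD_neg v x _ hx hb, List.getD_eq_getElem _ _ hj]
      constructor
      · simpa using h.1
      · intro r hr
        rcases List.mem_or_eq_of_mem_set hr with hr | rfl
        · exact h.2 r hr
        · rw [PySem.List.length_pySetD, hrow]
          exact h.2 _ (List.getElem_mem hj)
  · rw [pvSetD_oob v x _ hir]
    exact h

theorem pvZ_update (size : Int) (v : List (List Int)) (nx ny : Int)
    (h : pvH size v) (hnx0 : 0 ≤ nx) (hnxs : nx < size) (hny0 : 0 ≤ ny) (hnys : ny < size)
    (hzero : PySem.List.pyGetD (PySem.List.pyGetD v nx []) ny 0 = 0) :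
    pvZ size (PySem.List.pySetD v nx (PySem.List.pySetD (PySem.List.pyGetD v nx []) ny 1)) + 1 ≤ pvZ size v := by
  have hlen : (nx : Int) < (v.length : Int) := lt_of_lt_of_le hnxs h.1
  have hlenv : nx.toNat < v.length := by omega
  have hrow : PySem.List.pyGetD v nx ([] : List Int) = v[nx.toNat] :=
    PySem.List.pyGetD_eq_getElem _ _ hnx0 hlen
  have hlenr : ny.toNat < (v[nx.toNat]).length := by
    have := h.2 _ (List.getElem_mem hlenv); omega
  have hz : (v[nx.toNat])[ny.toNat] = 0 := by
    rw [hrow] at hzero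
    rwa [PySem.List.pyGetD_eq_getElem _ _ hny0 (by omega)] at hzero
  rw [hrow, PySem.List.pySetD_of_nonneg _ _ hny0, PySem.List.pySetD_of_nonneg _ _ hnx0]
  unfold pvZ
  rw [List.take_set, List.map_set]
  have hidx : nx.toNat < ((v.take size.toNat).map (fun r => (r.take size.toNat).countP (fun e => decide (e = 0)))).length := by
    simp; omega
  have hcell : ((v.take size.toNat).map (fun r => (r.take size.toNat).countP (fun e => decide (e = 0))))[nx.toNat]'hidx =
      ((v[nx.toNat]).take size.toNat).countP (fun e => decide (e = 0)) := by
    simp [List.getElem_take]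
  have hcount : (((v[nx.toNat]).set ny.toNat 1).take size.toNat).countP (fun e => decide (e = 0)) + 1
      = ((v[nx.toNat]).take size.toNat).countP (fun e => decide (e = 0)) := by
    rw [List.take_set]
    exact pvCountP_set _ _ (by simp; omega) (by simp [List.getElem_take, hz])
  apply pvSum_set _ _ _ hidx
  rw [hcell]; omega

-- one abstract A-step on a stack 'pend ++ s' is one pvTry probe with the tail s untouched
theorem pvStep_rel (mat : List (List Int)) (size flag a b : Int)
    (stB : (List (List Int) × List (Int × Int)) × List (Int × Int)) (s0 : List (Int × Int)) (nx ny : Int) :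
    pvStepA mat size flag a b (stB.1.1, stB.2 ++ s0, stB.1.2) nx ny
      = ((pvTry mat size flag a b stB nx ny).1.1,
         (pvTry mat size flag a b stB nx ny).2 ++ s0,
         (pvTry mat size flag a b stB nx ny).1.2) := by
  unfold pvStepA pvTry
  by_cases hb : 0 ≤ nx ∧ nx < size ∧ 0 ≤ ny ∧ ny < size
  · by_cases hin : PySem.List.pyGetD (PySem.List.pyGetD stB.1.1 nx []) ny 0 = 0 ∧
        PySem.Int.bxor (PySem.List.pyGetD (PySem.List.pyGetD mat nx []) ny 0) flag ≠ 0
    · rw [if_pos hb, if_pos hin, if_pos ⟨hb.1, hb.2.1, hb.2.2.1, hb.2.2.2, hin.1, hin.2⟩]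
      rfl
    · rw [if_pos hb, if_neg hin, if_neg (fun h => hin ⟨h.2.2.2.2.1, h.2.2.2.2.2⟩)]
  · rw [if_neg hb, if_neg (fun h => hb ⟨h.1, h.2.1, h.2.2.1, h.2.2.2.1⟩)]

theorem pvTry_neg (mat : List (List Int)) (size flag a b : Int)
    (st : (List (List Int) × List (Int × Int)) × List (Int × Int)) (nx ny : Int)
    (hb : ¬ (0 ≤ nx ∧ nx < size ∧ 0 ≤ ny ∧ ny < size)) :
    pvTry mat size flag a b st nx ny = st := by
  unfold pvTry
  rw [if_neg (fun h => hb ⟨h.1, h.2.1, h.2.2.1, h.2.2.2.1⟩)]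

-- A's inner fold over range(4) is B's four-probe neighbourhood scan with the old stack as tail
theorem pvInner (mat : List (List Int)) (size flag a b : Int) (c : Int × Int)
    (v : List (List Int)) (s p : List (Int × Int)) :
    (PySem.List.pyRange 0 4 1).foldl (fun st i => pvBodyA mat size flag a b st c i) (v, s, p)
      = ((pvNbhd mat size flag a b (v, p) c).1.1,
         (pvNbhd mat size flag a b (v, p) c).2 ++ s,
         (pvNbhd mat size flag a b (v, p) c).1.2) := by
  have hr : PySem.List.pyRange 0 4 1 = [0, 1, 2, 3] := by decide
  have e0 : PySem.List.pyGetD pvDx (0 : Int) 0 + c.1 = c.1 := by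
    have : PySem.List.pyGetD pvDx (0 : Int) 0 = 0 := by decide
    rw [this]; ring
  have f0 : PySem.List.pyGetD pvDy (0 : Int) 0 + c.2 = c.2 + 1 := by
    have : PySem.List.pyGetD pvDy (0 : Int) 0 = 1 := by decide
    rw [this]; ring
  have e1 : PySem.List.pyGetD pvDx (1 : Int) 0 + c.1 = c.1 := by
    have : PySem.List.pyGetD pvDx (1 : Int) 0 = 0 := by decide
    rw [this]; ring
  have f1 : PySem.List.pyGetD pvDy (1 : Int) 0 + c.2 = c.2 - 1 := by
    have : PySem.List.pyGetD pvDy (1 : Int) 0 = -1 := by decide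
    rw [this]; ring
  have e2 : PySem.List.pyGetD pvDx (2 : Int) 0 + c.1 = c.1 + 1 := by
    have : PySem.List.pyGetD pvDx (2 : Int) 0 = 1 := by decide
    rw [this]; ring
  have f2 : PySem.List.pyGetD pvDy (2 : Int) 0 + c.2 = c.2 := by
    have : PySem.List.pyGetD pvDy (2 : Int) 0 = 0 := by decide
    rw [this]; ring
  have e3 : PySem.List.pyGetD pvDx (3 : Int) 0 + c.1 = c.1 - 1 := by
    have : PySem.List.pyGetD pvDx (3 : Int) 0 = -1 := by decide
    rw [this]; ring
  have f3 : PySem.List.pyGetD pvDy (3 : Int) 0 + c.2 = c.2 := by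
    have : PySem.List.pyGetD pvDy (3 : Int) 0 = 0 := by decide
    rw [this]; ring
  rw [hr]
  simp only [List.foldl_cons, List.foldl_nil, pvBodyA_eq]
  rw [e0, f0, e1, f1, e2, f2, e3, f3]
  have h1 := pvStep_rel mat size flag a b ((v, p), []) s c.1 (c.2 + 1)
  simp only [List.nil_append] at h1
  rw [h1, pvStep_rel, pvStep_rel, pvStep_rel]
  rfl

-- each collected pending entry accounts for one zero cell of the window flipped to 1
theorem pvTryHZ (mat : List (List Int)) (size flag a b : Int)
    (st : (List (List Int) × List (Int × Int)) × List (Int × Int)) (nx ny : Int)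
    (h : pvH size st.1.1) :
    pvH size (pvTry mat size flag a b st nx ny).1.1 ∧
    pvZ size (pvTry mat size flag a b st nx ny).1.1 + (pvTry mat size flag a b st nx ny).2.length
      ≤ pvZ size st.1.1 + st.2.length := by
  unfold pvTry
  split_ifs with hc
  · refine ⟨pvH_update size st.1.1 nx ny h hc.1 (lt_of_lt_of_le hc.2.1 h.1), ?_⟩
    have := pvZ_update size st.1.1 nx ny h hc.1 hc.2.1 hc.2.2.1 hc.2.2.2.1 hc.2.2.2.2.1
    simp only [List.length_cons]
    omega
  · exact ⟨h, le_refl _⟩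

theorem pvNbhdHZ (mat : List (List Int)) (size flag a b : Int)
    (vp : List (List Int) × List (Int × Int)) (c : Int × Int) (h : pvH size vp.1) :
    pvH size (pvNbhd mat size flag a b vp c).1.1 ∧
    pvZ size (pvNbhd mat size flag a b vp c).1.1 + (pvNbhd mat size flag a b vp c).2.length
      ≤ pvZ size vp.1 := by
  unfold pvNbhd
  have h1 := pvTryHZ mat size flag a b (vp, []) c.1 (c.2 + 1) h
  have h2 := pvTryHZ mat size flag a b _ c.1 (c.2 - 1) h1.1
  have h3 := pvTryHZ mat size flag a b _ (c.1 + 1) c.2 h2.1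
  have h4 := pvTryHZ mat size flag a b _ (c.1 - 1) c.2 h3.1
  refine ⟨h4.1, ?_⟩
  simp only [List.length_nil] at h1
  omega

-- pvDfs preserves pvH and never increases pvZ
theorem pvZMon (mat : List (List Int)) (size flag a b : Int) :
    ∀ (f : Nat) (vp : List (List Int) × List (Int × Int)) (c : Int × Int), pvH size vp.1 →
      pvH size (pvDfs mat size flag a b f vp c).1 ∧
      pvZ size (pvDfs mat size flag a b f vp c).1 ≤ pvZ size vp.1 := by
  intro f
  induction f with
  | zero => intro vp c h; exact ⟨h, le_refl _⟩
  | succ f ihf =>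
    intro vp c h
    simp only [pvDfs]
    have hexp := pvNbhdHZ mat size flag a b vp c h
    have hfold : ∀ (l : List (Int × Int)) (st' : List (List Int) × List (Int × Int)), pvH size st'.1 →
        pvH size (l.foldl (fun vp c' => pvDfs mat size flag a b f vp c') st').1 ∧
        pvZ size (l.foldl (fun vp c' => pvDfs mat size flag a b f vp c') st').1 ≤ pvZ size st'.1 := by
      intro l
      induction l with
      | nil => intro st' h'; exact ⟨h', le_refl _⟩
      | cons c' t iht =>
        intro st' h'
        simp only [List.foldl_cons]
        obtain ⟨hh, hz⟩ := ihf st' c' h'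
        obtain ⟨hh2, hz2⟩ := iht _ hh
        exact ⟨hh2, le_trans hz2 hz⟩
    obtain ⟨hh, hz⟩ := hfold _ _ hexp.1
    exact ⟨hh, le_trans hz (by omega)⟩

-- pvDfs does not depend on the fuel once the fuel exceeds the number of zero cells
theorem pvFuel (mat : List (List Int)) (size flag a b : Int) :
    ∀ (z f1 f2 : Nat) (vp : List (List Int) × List (Int × Int)) (c : Int × Int),
      pvH size vp.1 → pvZ size vp.1 ≤ z → pvZ size vp.1 + 1 ≤ f1 → pvZ size vp.1 + 1 ≤ f2 →
      pvDfs mat size flag a b f1 vp c = pvDfs mat size flag a b f2 vp c := by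
  intro z
  induction z using Nat.strong_induction_on with
  | _ z ih =>
    intro f1 f2 vp c h hz h1 h2
    match f1, f2, h1, h2 with
    | f1 + 1, f2 + 1, h1, h2 =>
      simp only [pvDfs]
      have hexp := pvNbhdHZ mat size flag a b vp c h
      rcases hch : (pvNbhd mat size flag a b vp c).2 with _ | ⟨c0, ch⟩
      · simp
      · have hlen : 1 ≤ (pvNbhd mat size flag a b vp c).2.length := by
          rw [hch]; simp
        have hzr : pvZ size (pvNbhd mat size flag a b vp c).1.1 + 1 ≤ pvZ size vp.1 := by
          omega
        have hfold : ∀ (l : List (Int × Int)) (st' : List (List Int) × List (Int × Int)), pvH size st'.1 →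
            pvZ size st'.1 ≤ pvZ size (pvNbhd mat size flag a b vp c).1.1 →
            l.foldl (fun vp c' => pvDfs mat size flag a b f1 vp c') st'
              = l.foldl (fun vp c' => pvDfs mat size flag a b f2 vp c') st' := by
          intro l
          induction l with
          | nil => intro st' _ _; rfl
          | cons c' t iht =>
            intro st' h' hz'
            simp only [List.foldl_cons]
            have hone : pvDfs mat size flag a b f1 st' c' = pvDfs mat size flag a b f2 st' c' := by
              apply ih (pvZ size st'.1) (by omega) f1 f2 st' c' h' (le_refl _) (by omega) (by omega)
            rw [hone]
            obtain ⟨hh, hzm⟩ := pvZMon mat size flag a b f2 st' c' h'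
            exact iht _ hh (le_trans hzm hz')
        exact hfold _ _ hexp.1 (le_refl _)

theorem pvFoldCong (mat : List (List Int)) (size flag a b : Int)
    (l : List (Int × Int)) (f1 f2 : Nat) :
    ∀ (vp : List (List Int) × List (Int × Int)), pvH size vp.1 →
      pvZ size vp.1 + 1 ≤ f1 → pvZ size vp.1 + 1 ≤ f2 →
      l.foldl (fun vp c => pvDfs mat size flag a b f1 vp c) vp
        = l.foldl (fun vp c => pvDfs mat size flag a b f2 vp c) vp := by
  induction l with
  | nil => intro vp _ _ _; rfl
  | cons c t iht =>
    intro vp h h1 h2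
    simp only [List.foldl_cons]
    have hone : pvDfs mat size flag a b f1 vp c = pvDfs mat size flag a b f2 vp c :=
      pvFuel mat size flag a b (pvZ size vp.1) f1 f2 vp c h (le_refl _) h1 h2
    rw [hone]
    obtain ⟨hh, hzm⟩ := pvZMon mat size flag a b f2 vp c h
    exact iht _ hh (by omega) (by omega)

-- the simulation: A's stack loop folds B's dfs over the stack
theorem pvSim (mat : List (List Int)) (size flag a b : Int) :
    ∀ (fA : Nat) (v : List (List Int)) (s : List (Int × Int)) (p : List (Int × Int)) (fB : Nat),
      pvH size v → pvZ size v + s.length ≤ fA → pvZ size v + 1 ≤ fB →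
      pvLoopA mat size flag a b fA v s p
        = (s.foldl (fun vp c => pvDfs mat size flag a b fB vp c) (v, p)).2 := by
  intro fA
  induction fA with
  | zero =>
    intro v s p fB h hA hB
    have hnil : s = [] := by cases s with
      | nil => rfl
      | cons c rest => simp at hA
    subst hnil
    rfl
  | succ fA ih =>
    intro v s p fB h hA hB
    cases s with
    | nil => rfl
    | cons c rest =>
      simp only [pvLoopA]
      rw [pvInner mat size flag a b c v rest p]
      have hexp : pvH size (pvNbhd mat size flag a b (v, p) c).1.1 ∧
          pvZ size (pvNbhd mat size flag a b (v, p) c).1.1 + (pvNbhd mat size flag a b (v, p) c).2.length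
            ≤ pvZ size v :=
        pvNbhdHZ mat size flag a b (v, p) c h
      simp only [List.length_cons] at hA
      rw [ih _ _ _ fB hexp.1 (by simp [List.length_append]; omega) (by omega)]
      rw [List.foldl_append]
      cases fB with
      | zero => omega
      | succ fB' =>
        have heta : ((pvNbhd mat size flag a b (v, p) c).1.1, (pvNbhd mat size flag a b (v, p) c).1.2)
            = (pvNbhd mat size flag a b (v, p) c).1 := rfl
        rw [heta]
        have hkey : (pvNbhd mat size flag a b (v, p) c).2.foldl
              (fun vp c' => pvDfs mat size flag a b (fB' + 1) vp c')
              (pvNbhd mat size flag a b (v, p) c).1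
            = pvDfs mat size flag a b (fB' + 1) (v, p) c := by
          have hstep : pvDfs mat size flag a b (fB' + 1) (v, p) c
              = (pvNbhd mat size flag a b (v, p) c).2.foldl
                  (fun vp c' => pvDfs mat size flag a b fB' vp c')
                  (pvNbhd mat size flag a b (v, p) c).1 := by
            simp only [pvDfs]
          rw [hstep]
          by_cases hch : (pvNbhd mat size flag a b (v, p) c).2 = []
          · simp only [hch, List.foldl_nil]
          · have hlen := List.length_pos_of_ne_nil hch
            exact pvFoldCong mat size flag a b _ (fB' + 1) fB' _ hexp.1 (by omega) (by omega)
        rw [List.foldl_cons, hkey]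

theorem pvLoopA_nil (mat : List (List Int)) (size flag a b : Int) (f : Nat) (v : List (List Int)) (p : List (Int × Int)) :
    pvLoopA mat size flag a b f v [] p = p := by
  cases f <;> rfl

-- ===== VERDICT (by name: the statement is the Claim_ definition above) =====
theorem outputPosition_spec : Claim_equal_outputPosition := by
  intro mat visit size x y flag _ hpre
  unfold Spec_outputPosition outputPosition outputPosition_alt
  have hp0 : PySem.Set.add PySem.Set.empty ((0 : Int), (0 : Int)) = PySem.Set.ofList [((0 : Int), (0 : Int))] := by decide
  rw [hp0]
  rcases hpre with ⟨_, _, hlv, hrv, _, _⟩ | ⟨_, _, hn1, hn2, hn3, hn4⟩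
  · have hH0 : pvH size (PySem.List.pySetD visit x (PySem.List.pySetD (PySem.List.pyGetD visit x []) y 1)) :=
      pvH_update_any size visit x y ⟨hlv, hrv⟩
    have hZ0 := pvZ_le size (PySem.List.pySetD visit x (PySem.List.pySetD (PySem.List.pyGetD visit x []) y 1))
    rw [pvSim mat size flag (-x) (-y) (size.toNat * size.toNat + 1) _ _ _ (size.toNat * size.toNat + 1) hH0 (by simp; omega) (by omega)]
    simp
  · -- degenerate start: no neighbour lies in the size×size window, both sides return {(0, 0)}
    have e0 : PySem.List.pyGetD pvDx (0 : Int) 0 = 0 := by decide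
    have e1 : PySem.List.pyGetD pvDx (1 : Int) 0 = 0 := by decide
    have e2 : PySem.List.pyGetD pvDx (2 : Int) 0 = 1 := by decide
    have e3 : PySem.List.pyGetD pvDx (3 : Int) 0 = -1 := by decide
    have f0 : PySem.List.pyGetD pvDy (0 : Int) 0 = 1 := by decide
    have f1 : PySem.List.pyGetD pvDy (1 : Int) 0 = -1 := by decide
    have f2 : PySem.List.pyGetD pvDy (2 : Int) 0 = 0 := by decide
    have f3 : PySem.List.pyGetD pvDy (3 : Int) 0 = 0 := by decide
    have hr : PySem.List.pyRange 0 4 1 = [0, 1, 2, 3] := by decide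
    have hg1 : ∀ st : List (List Int) × List (Int × Int) × List (Int × Int),
        pvStepA mat size flag (-x) (-y) st (PySem.List.pyGetD pvDx (0 : Int) 0 + x) (PySem.List.pyGetD pvDy (0 : Int) 0 + y) = st := by
      intro st; unfold pvStepA
      rw [if_neg (by rw [e0, f0]; intro hb; exact hn1 ⟨by omega, by omega, by omega, by omega⟩)]
    have hg2 : ∀ st : List (List Int) × List (Int × Int) × List (Int × Int),
        pvStepA mat size flag (-x) (-y) st (PySem.List.pyGetD pvDx (1 : Int) 0 + x) (PySem.List.pyGetD pvDy (1 : Int) 0 + y) = st := by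
      intro st; unfold pvStepA
      rw [if_neg (by rw [e1, f1]; intro hb; exact hn2 ⟨by omega, by omega, by omega, by omega⟩)]
    have hg3 : ∀ st : List (List Int) × List (Int × Int) × List (Int × Int),
        pvStepA mat size flag (-x) (-y) st (PySem.List.pyGetD pvDx (2 : Int) 0 + x) (PySem.List.pyGetD pvDy (2 : Int) 0 + y) = st := by
      intro st; unfold pvStepA
      rw [if_neg (by rw [e2, f2]; intro hb; exact hn3 ⟨by omega, by omega, by omega, by omega⟩)]
    have hg4 : ∀ st : List (List Int) × List (Int × Int) × List (Int × Int),
        pvStepA mat size flag (-x) (-y) st (PySem.List.pyGetD pvDx (3 : Int) 0 + x) (PySem.List.pyGetD pvDy (3 : Int) 0 + y) = st := by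
      intro st; unfold pvStepA
      rw [if_neg (by rw [e3, f3]; intro hb; exact hn4 ⟨by omega, by omega, by omega, by omega⟩)]
    have hb1 : ∀ st : (List (List Int) × List (Int × Int)) × List (Int × Int),
        pvTry mat size flag (-x) (-y) st x (y + 1) = st := by
      intro st; exact pvTry_neg _ _ _ _ _ _ _ _ (fun hb => hn1 ⟨hb.1, hb.2.1, hb.2.2.1, hb.2.2.2⟩)
    have hb2 : ∀ st : (List (List Int) × List (Int × Int)) × List (Int × Int),
        pvTry mat size flag (-x) (-y) st x (y - 1) = st := by
      intro st; exact pvTry_neg _ _ _ _ _ _ _ _ (fun hb => hn2 ⟨hb.1, hb.2.1, hb.2.2.1, hb.2.2.2⟩)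
    have hb3 : ∀ st : (List (List Int) × List (Int × Int)) × List (Int × Int),
        pvTry mat size flag (-x) (-y) st (x + 1) y = st := by
      intro st; exact pvTry_neg _ _ _ _ _ _ _ _ (fun hb => hn3 ⟨hb.1, hb.2.1, hb.2.2.1, hb.2.2.2⟩)
    have hb4 : ∀ st : (List (List Int) × List (Int × Int)) × List (Int × Int),
        pvTry mat size flag (-x) (-y) st (x - 1) y = st := by
      intro st; exact pvTry_neg _ _ _ _ _ _ _ _ (fun hb => hn4 ⟨hb.1, hb.2.1, hb.2.2.1, hb.2.2.2⟩)
    show pvLoopA mat size flag (-x) (-y) (size.toNat * size.toNat + 1) _ [(x, y)] _ = _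
    simp only [pvLoopA, pvDfs, pvNbhd, hr, List.foldl_cons, List.foldl_nil, pvBodyA_eq,
      hg1, hg2, hg3, hg4, hb1, hb2, hb3, hb4, List.foldl_nil]
    exact pvLoopA_nil mat size flag (-x) (-y) _ _ _
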